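-- pv_equiv track=rewrite | github.com/colintrachte/PythonMacros | plugins/gcode_utils.py | convert_to_klipper_format
-- ===== SOURCE A (Python) =====
-- def convert_to_klipper_format(lines):
--     """Convert legacy laser G-code to Klipper SET_PIN format."""
--     converted_lines = []
--     for line in lines:
--         line = line.strip()
--         if line.startswith("G1") and "S" in line:
--             parts = line.split()
--             x_val = next((p[1:] for p in parts if p.startswith("X")), None)
--             y_val = next((p[1:] for p in parts if p.startswith("Y")), None)
--             s_val = next((p[1:] for p in parts if p.startswith("S")), None)
--             f_val = next((p[1:] for p in parts if p.startswith("F")), None)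
--
--             if s_val is not None:
--                 converted_lines.append(f"SET_PIN PIN=laser VALUE={s_val}\n")
--             if x_val and y_val and f_val:
--                 converted_lines.append(f"G1 X{x_val} Y{y_val} F{f_val}\n")
--         else:
--             converted_lines.append(line + '\n')
--     return converted_lines
-- ===== SOURCE B (Python) =====
-- def _convert_line(line):
--     """Convert one already-stripped G-code line into zero or more output lines."""
--     if not (line.startswith("G1") and "S" in line):
--         return [line + "\n"]
--     x = y = s = f = None
--     i, n = 0, len(line)
--     while i < n:
--         if line[i].isspace():
--             i += 1
--             continue
--         j = i + 1
--         while j < n and not line[j].isspace():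
--             j += 1
--         c, rest = line[i], line[i + 1:j]
--         if c == "S":
--             if s is None:
--                 s = rest
--         elif c == "X":
--             if x is None:
--                 x = rest
--         elif c == "Y":
--             if y is None:
--                 y = rest
--         elif c == "F":
--             if f is None:
--                 f = rest
--         i = j
--     out = []
--     if s is not None:
--         out.append(f"SET_PIN PIN=laser VALUE={s}\n")
--     if x and y and f:
--         out.append(f"G1 X{x} Y{y} F{f}\n")
--     return out
--
--
-- def convert_to_klipper_format(lines):
--     """Convert legacy laser G-code to Klipper SET_PIN format."""
--     return [out for line in lines for out in _convert_line(line.strip())]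
-- ===== Notes on version B (the rewrite author's own statement) =====
-- stated objective: alternative
-- what changed: Replaces A's tokenize-then-scan-four-times design (split() plus one generator scan per letter X/Y/S/F) with a single character-level scan of each line that walks token boundaries by index and fills four first-occurrence accumulators in one pass, and emits the output via a flat list comprehension over a per-line helper instead of A's appending loop.
import Mathlib
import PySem

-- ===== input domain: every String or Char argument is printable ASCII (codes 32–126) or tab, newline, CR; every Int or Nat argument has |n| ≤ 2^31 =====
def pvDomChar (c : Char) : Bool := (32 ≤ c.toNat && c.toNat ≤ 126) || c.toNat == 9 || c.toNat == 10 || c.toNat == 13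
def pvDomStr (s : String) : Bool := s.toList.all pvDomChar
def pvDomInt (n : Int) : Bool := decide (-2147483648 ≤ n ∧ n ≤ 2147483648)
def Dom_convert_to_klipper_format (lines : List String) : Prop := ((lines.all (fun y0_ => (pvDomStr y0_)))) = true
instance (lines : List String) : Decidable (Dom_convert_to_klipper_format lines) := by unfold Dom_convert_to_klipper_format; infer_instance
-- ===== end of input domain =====

-- B replaces A's tokenize-then-scan-four-times design by one character-level scan per line
-- with four first-occurrence accumulators, emitted through a per-line helper that is
-- flat-mapped over the input (objective: alternative).

-- ===== PORT A =====
-- next((p[1:] for p in parts if p.startswith(pre)), None)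
def pvNext (parts : List String) (pre : String) : Option String :=
  match parts with
  | [] => none
  | p :: rest =>
      if PySem.Str.startswith p pre then some (PySem.Str.slice p (some 1) none)
      else pvNext rest pre

def convert_to_klipper_format (lines : List String) : List String :=
  lines.foldl (fun converted_lines line =>
    let line := PySem.Str.strip line
    if PySem.Str.startswith line "G1" && PySem.Str.isIn "S" line then
      let parts := PySem.Str.split₀ line
      let x_val := pvNext parts "X"
      let y_val := pvNext parts "Y"
      let s_val := pvNext parts "S"
      let f_val := pvNext parts "F"
      let converted_lines :=
        match s_val with
        | some s => converted_lines ++ ["SET_PIN PIN=laser VALUE=" ++ s ++ "\n"]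
        | none => converted_lines
      match x_val, y_val, f_val with
      | some x, some y, some f =>
          if x ≠ "" && y ≠ "" && f ≠ "" then
            converted_lines ++ ["G1 X" ++ x ++ " Y" ++ y ++ " F" ++ f ++ "\n"]
          else converted_lines
      | _, _, _ => converted_lines
    else converted_lines ++ [line ++ "\n"]) []

-- ===== PORT B =====
-- the two nested while loops over indices: one pass over the characters; at a non-space
-- character the inner loop extends j to the end of the token (line[i+1:j] = takeWhile /
-- dropWhile of the remainder), and the elif chain fills the first-occurrence accumulators
def pvScan : List Char → Option (List Char) → Option (List Char) → Option (List Char) →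
    Option (List Char) →
    Option (List Char) × Option (List Char) × Option (List Char) × Option (List Char)
  | [], x, y, s, f => (x, y, s, f)
  | c :: rest, x, y, s, f =>
      if PySem.Chars.isspace c then pvScan rest x y s f
      else
        let tok := rest.takeWhile (fun d => !PySem.Chars.isspace d)
        let rest' := rest.dropWhile (fun d => !PySem.Chars.isspace d)
        if c == 'S' then pvScan rest' x y (if s == none then some tok else s) f
        else if c == 'X' then pvScan rest' (if x == none then some tok else x) y s f
        else if c == 'Y' then pvScan rest' x (if y == none then some tok else y) s f
        else if c == 'F' then pvScan rest' x y s (if f == none then some tok else f)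
        else pvScan rest' x y s f
  termination_by cs => cs.length
  decreasing_by
    all_goals first
      | (simp; done)
      | simpa using List.length_dropWhile_le _ _

-- _convert_line(line): line is already stripped here
def pvConvLine (line : String) : List String :=
  if !(PySem.Str.startswith line "G1" && PySem.Str.isIn "S" line) then
    [String.ofList (line.toList ++ ['\n'])]
  else
    match pvScan line.toList none none none none with
    | (x, y, s, f) =>
      (match s with
       | some sv => [String.ofList ("SET_PIN PIN=laser VALUE=".toList ++ sv ++ ['\n'])]
       | none => []) ++
      (match x with
       | none => []
       | some xv =>
         match y with
         | none => []
         | some yv =>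
           match f with
           | none => []
           | some fv =>
             if xv ≠ [] && yv ≠ [] && fv ≠ [] then
               [String.ofList ("G1 X".toList ++ xv ++ " Y".toList ++ yv ++
                 " F".toList ++ fv ++ ['\n'])]
             else [])

-- [out for line in lines for out in _convert_line(line.strip())]
def convert_to_klipper_format_alt (lines : List String) : List String :=
  lines.flatMap (fun line => pvConvLine (PySem.Str.strip line))

-- ===== PRECONDITION & SPEC =====
def Spec_convert_to_klipper_format (lines : List String) (out : List String) : Prop := out = convert_to_klipper_format_alt lines
instance (lines : List String) (out : List String) : Decidable (Spec_convert_to_klipper_format lines out) := by unfold Spec_convert_to_klipper_format; infer_instance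

-- ===== CLAIM (what is proved, stated in full; the proofs are below) =====
def Claim_equal_convert_to_klipper_format : Prop := ∀ (lines : List String), Dom_convert_to_klipper_format lines → Spec_convert_to_klipper_format lines (convert_to_klipper_format lines)

-- ===== LEMMAS AND PROOFS =====

-- first token starting with k among a token list, its tail (proof-side characterisation)
def pvFirst : List (List Char) → Char → Option (List Char)
  | [], _ => none
  | t :: ts, k => if t.head? == some k then some t.tail else pvFirst ts k

lemma pvGoAcc (l : List Char) : ∀ (cur : List Char) (acc : List (List Char)),
    PySem.Chars.split₀.go l cur acc = acc.reverse ++ PySem.Chars.split₀.go l cur [] := by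
  induction l with
  | nil =>
      intro cur acc
      by_cases h : cur.isEmpty <;> simp [PySem.Chars.split₀.go, h]
  | cons c t ih =>
      intro cur acc
      by_cases hs : PySem.Chars.isspace c
      · by_cases h : cur.isEmpty
        · simp only [PySem.Chars.split₀.go, hs, h, if_true]
          exact ih [] acc
        · simp only [PySem.Chars.split₀.go, hs, h, if_true, if_false]
          rw [ih [] (cur.reverse :: acc), ih [] [cur.reverse]]
          simp
      · simp only [PySem.Chars.split₀.go, hs, if_false]
        exact ih (c :: cur) acc

lemma pvSplitSpace {c : Char} (t : List Char) (hs : PySem.Chars.isspace c = true) :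
    PySem.Chars.split₀ (c :: t) = PySem.Chars.split₀ t := by
  simp [PySem.Chars.split₀, PySem.Chars.split₀.go, hs]

lemma pvGoTok (l : List Char) : ∀ (cur : List Char), cur ≠ [] →
    PySem.Chars.split₀.go l cur [] =
      (cur.reverse ++ l.takeWhile (fun d => !PySem.Chars.isspace d)) ::
        PySem.Chars.split₀ (l.dropWhile (fun d => !PySem.Chars.isspace d)) := by
  induction l with
  | nil =>
      intro cur hc
      simp [PySem.Chars.split₀.go, PySem.Chars.split₀, List.isEmpty_iff, hc]
  | cons c t ih =>
      intro cur hc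
      by_cases hs : PySem.Chars.isspace c
      · simp only [PySem.Chars.split₀.go, hs, if_true, List.isEmpty_iff, hc, if_false]
        rw [pvGoAcc]
        have h1 : List.takeWhile (fun d => !PySem.Chars.isspace d) (c :: t) = [] := by simp [hs]
        have h2 : List.dropWhile (fun d => !PySem.Chars.isspace d) (c :: t) = c :: t := by simp [hs]
        rw [h1, h2, pvSplitSpace t hs]
        simp [PySem.Chars.split₀]
      · simp only [PySem.Chars.split₀.go, hs, if_false]
        rw [ih (c :: cur) (by simp)]
        simp [List.takeWhile_cons, List.dropWhile_cons, hs]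

lemma pvSplitTok {c : Char} (t : List Char) (hs : PySem.Chars.isspace c = false) :
    PySem.Chars.split₀ (c :: t) =
      (c :: t.takeWhile (fun d => !PySem.Chars.isspace d)) ::
        PySem.Chars.split₀ (t.dropWhile (fun d => !PySem.Chars.isspace d)) := by
  show PySem.Chars.split₀.go (c :: t) [] [] = _
  simp only [PySem.Chars.split₀.go, hs, if_false, Bool.false_eq_true]
  rw [pvGoTok t [c] (by simp)]
  simp

-- p.startswith(key) for a one-letter key tests p's first character
lemma pvStartsHead (p key : String) (k : Char) (hk : key.toList = [k]) :
    PySem.Str.startswith p key = (p.toList.head? == some k) := by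
  rw [PySem.Str.startswith_eq, hk]
  cases hp : p.toList with
  | nil =>
      cases he : PySem.Chars.startswith [] [k]
      · simp
      · exact absurd ((PySem.Chars.startswith_iff _ _).mp he) (by simp)
  | cons c cs =>
      by_cases h : c = k
      · subst h
        have hb : PySem.Chars.startswith (c :: cs) [c] = true :=
          (PySem.Chars.startswith_iff (c :: cs) [c]).mpr ⟨cs, rfl⟩
        simp [hb]
      · cases he : PySem.Chars.startswith (c :: cs) [k]
        · simp [h]
        · exact absurd ((List.cons_prefix_cons.mp
            ((PySem.Chars.startswith_iff _ _).mp he)).1) (fun q => h q.symm)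

-- p[1:] is p's tail
lemma pvSliceTail (p : String) :
    PySem.Str.slice p (some 1) none = String.ofList p.toList.tail := by
  unfold PySem.Str.slice
  congr 1
  rw [show ((1 : Int)) = ((1 : Nat) : Int) by norm_num, PySem.Chars.slice_eq_listSlice,
    PySem.List.slice_from p.toList (by norm_num)]
  exact List.drop_one

-- A's per-letter scan over the split tokens is pvFirst on the char-level tokens
lemma pvNextEq (parts : List String) (key : String) (k : Char) (hk : key.toList = [k]) :
    pvNext parts key = (pvFirst (parts.map String.toList) k).map String.ofList := by
  induction parts with
  | nil => rfl
  | cons p rest ih =>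
      simp only [pvNext, List.map_cons, pvFirst, pvStartsHead p key k hk]
      by_cases h : (p.toList.head? == some k) = true
      · simp [h, pvSliceTail]
      · have hb : (p.toList.head? == some k) = false := by
          revert h; cases p.toList.head? == some k <;> simp
        simp [hb, ih]

-- first-occurrence semantics of the accumulators
def pvOr (a b : Option (List Char)) : Option (List Char) :=
  match a with
  | some v => some v
  | none => b

lemma pvOrNone (b : Option (List Char)) : pvOr none b = b := rfl

lemma pvScanSpec (cs : List Char) : ∀ x y s f,
    pvScan cs x y s f =
      (pvOr x (pvFirst (PySem.Chars.split₀ cs) 'X'),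
       pvOr y (pvFirst (PySem.Chars.split₀ cs) 'Y'),
       pvOr s (pvFirst (PySem.Chars.split₀ cs) 'S'),
       pvOr f (pvFirst (PySem.Chars.split₀ cs) 'F')) := by
  induction hn : cs.length using Nat.strong_induction_on generalizing cs with
  | _ n ih =>
  intro x y s f
  match cs with
  | [] =>
      rw [pvScan]
      cases x <;> cases y <;> cases s <;> cases f <;>
        simp [PySem.Chars.split₀, PySem.Chars.split₀.go, pvFirst, pvOr]
  | c :: rest =>
      by_cases hs : PySem.Chars.isspace c
      · rw [show pvScan (c :: rest) x y s f = pvScan rest x y s f by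
            rw [pvScan]; simp [hs], pvSplitSpace rest hs]
        exact ih rest.length (by simp [← hn]) rest rfl x y s f
      · rw [pvSplitTok rest (by simpa using hs)]
        have hlt : (rest.dropWhile (fun d => !PySem.Chars.isspace d)).length < n := by
          have := List.length_dropWhile_le (fun d => !PySem.Chars.isspace d) rest
          simp [← hn]; omega
        have ihd := ih _ hlt (rest.dropWhile (fun d => !PySem.Chars.isspace d)) rfl
        rw [pvScan]
        simp only [hs, if_false, Bool.false_eq_true]
        by_cases hS : c = 'S'
        · subst hS
          rw [if_pos (by decide)]
          rw [ihd]
          cases s <;> simp [pvFirst, pvOr]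
        · by_cases hX : c = 'X'
          · subst hX
            rw [if_neg (by decide), if_pos (by decide)]
            rw [ihd]
            cases x <;> simp [pvFirst, pvOr, hS]
          · by_cases hY : c = 'Y'
            · subst hY
              rw [if_neg (by decide), if_neg (by decide), if_pos (by decide)]
              rw [ihd]
              cases y <;> simp [pvFirst, pvOr, hS, hX]
            · by_cases hF : c = 'F'
              · subst hF
                rw [if_neg (by decide), if_neg (by decide), if_neg (by decide),
                  if_pos (by decide)]
                rw [ihd]
                cases f <;> simp [pvFirst, pvOr, hS, hX, hY]
              · rw [if_neg (by simpa using hS), if_neg (by simpa using hX),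
                  if_neg (by simpa using hY), if_neg (by simpa using hF)]
                rw [ihd]
                simp [pvFirst, hS, hX, hY, hF]

-- string-building facts used to compare the two ports' output lines
lemma pvStrExt {a b : String} (h : a.toList = b.toList) : a = b := by
  have := congrArg String.ofList h
  rwa [String.ofList_toList, String.ofList_toList] at this

lemma pvCatNl (l : String) : l ++ "\n" = String.ofList (l.toList ++ ['\n']) := by
  apply pvStrExt; simp [String.toList_append, String.toList_ofList]

lemma pvCatSet (v : List Char) : "SET_PIN PIN=laser VALUE=" ++ String.ofList v ++ "\n" =
    String.ofList ("SET_PIN PIN=laser VALUE=".toList ++ v ++ ['\n']) := by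
  apply pvStrExt; simp [String.toList_append, String.toList_ofList]

lemma pvCatG1 (x y f : List Char) :
    "G1 X" ++ String.ofList x ++ " Y" ++ String.ofList y ++ " F" ++ String.ofList f ++ "\n" =
    String.ofList ("G1 X".toList ++ x ++ " Y".toList ++ y ++ " F".toList ++ f ++ ['\n']) := by
  apply pvStrExt; simp [String.toList_append, String.toList_ofList]

-- A's whole per-line body appends exactly the lines pvConvLine produces
lemma pvLineEq (acc : List String) (line : String) :
    (let l := PySem.Str.strip line
     if PySem.Str.startswith l "G1" && PySem.Str.isIn "S" l then
       let parts := PySem.Str.split₀ l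
       let x_val := pvNext parts "X"
       let y_val := pvNext parts "Y"
       let s_val := pvNext parts "S"
       let f_val := pvNext parts "F"
       let acc :=
         match s_val with
         | some s => acc ++ ["SET_PIN PIN=laser VALUE=" ++ s ++ "\n"]
         | none => acc
       match x_val, y_val, f_val with
       | some x, some y, some f =>
           if x ≠ "" && y ≠ "" && f ≠ "" then
             acc ++ ["G1 X" ++ x ++ " Y" ++ y ++ " F" ++ f ++ "\n"]
           else acc
       | _, _, _ => acc
     else acc ++ [l ++ "\n"]) = acc ++ pvConvLine (PySem.Str.strip line) := by
  set l := PySem.Str.strip line with hl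
  by_cases hg : (PySem.Str.startswith l "G1" && PySem.Str.isIn "S" l) = true
  · have hmap : (PySem.Str.split₀ l).map String.toList = PySem.Chars.split₀ l.toList := by
      simp [PySem.Str.split₀, Function.comp_def]
    have hx := pvNextEq (PySem.Str.split₀ l) "X" 'X' rfl
    have hy := pvNextEq (PySem.Str.split₀ l) "Y" 'Y' rfl
    have hs := pvNextEq (PySem.Str.split₀ l) "S" 'S' rfl
    have hf := pvNextEq (PySem.Str.split₀ l) "F" 'F' rfl
    rw [hmap] at hx hy hs hf
    have hb : pvScan l.toList none none none none =
        (pvFirst (PySem.Chars.split₀ l.toList) 'X',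
         pvFirst (PySem.Chars.split₀ l.toList) 'Y',
         pvFirst (PySem.Chars.split₀ l.toList) 'S',
         pvFirst (PySem.Chars.split₀ l.toList) 'F') := by
      rw [pvScanSpec]; simp only [pvOrNone]
    simp only [hg, if_true, pvConvLine, Bool.not_true, Bool.false_eq_true, if_false,
      hx, hy, hs, hf, hb]
    cases pvFirst (PySem.Chars.split₀ l.toList) 'X' <;>
      cases pvFirst (PySem.Chars.split₀ l.toList) 'Y' <;>
        cases pvFirst (PySem.Chars.split₀ l.toList) 'S' <;>
          cases pvFirst (PySem.Chars.split₀ l.toList) 'F' <;>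
            simp [pvCatSet, pvCatG1, List.append_assoc] <;>
              (try (split_ifs <;> simp_all))
  · simp only [hg, Bool.false_eq_true, if_false, pvConvLine, Bool.not_false, if_true]
    rw [pvCatNl]

-- ===== VERDICT (by name: the statement is the Claim_ definition above) =====
theorem convert_to_klipper_format_spec : Claim_equal_convert_to_klipper_format := by
  intro lines _
  unfold Spec_convert_to_klipper_format convert_to_klipper_format convert_to_klipper_format_alt
  have hfun : (fun (acc : List String) (line : String) =>
      let l := PySem.Str.strip line
      if PySem.Str.startswith l "G1" && PySem.Str.isIn "S" l then
        let parts := PySem.Str.split₀ l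
        let x_val := pvNext parts "X"
        let y_val := pvNext parts "Y"
        let s_val := pvNext parts "S"
        let f_val := pvNext parts "F"
        let acc :=
          match s_val with
          | some s => acc ++ ["SET_PIN PIN=laser VALUE=" ++ s ++ "\n"]
          | none => acc
        match x_val, y_val, f_val with
        | some x, some y, some f =>
            if x ≠ "" && y ≠ "" && f ≠ "" then
              acc ++ ["G1 X" ++ x ++ " Y" ++ y ++ " F" ++ f ++ "\n"]
            else acc
        | _, _, _ => acc
      else acc ++ [l ++ "\n"]) =
      fun acc line => acc ++ pvConvLine (PySem.Str.strip line) := by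
    funext acc line
    exact pvLineEq acc line
  rw [hfun, PySem.List.foldl_append_eq_flatMap]
  simp
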